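-- pv_equiv track=rewrite | github.com/ontology-tools/binche2 | wikidata/combine_human_datasets.py | _merge_chebi_source
-- ===== SOURCE A (Python) =====
-- def _clean(value: str | None) -> str:
--     if value is None:
--         return ""
--     return str(value).strip()
--
-- def _merge_chebi_source(existing: str, new_value: str) -> str:
--     parts = []
--     seen = set()
--     for text in [existing, new_value]:
--         for token in _clean(text).split("|"):
--             token = token.strip()
--             if token and token not in seen:
--                 parts.append(token)
--                 seen.add(token)
--     return "|".join(parts)
-- ===== SOURCE B (Python) =====
-- def _clean(value):
--     if value is None:
--         return ""
--     return str(value).strip()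
--
-- def _merge_chebi_source(existing: str, new_value: str) -> str:
--     # Phase 1: collect all stripped non-empty tokens from both strings.
--     tokens = []
--     for text in (existing, new_value):
--         tokens += [t for t in (tok.strip() for tok in _clean(text).split("|")) if t]
--     # Phase 2: dedup by purging - take the head, drop all its copies from the rest.
--     parts = []
--     while tokens:
--         head = tokens[0]
--         parts.append(head)
--         tokens = [t for t in tokens[1:] if t != head]
--     return "|".join(parts)
-- ===== Notes on version B (the rewrite author's own statement) =====
-- stated objective: alternative
-- what changed: Replaces A's single interleaved pass with a seen-set membership check by a two-phase algorithm: first collect all stripped non-empty tokens, then deduplicate with a purging worklist that repeatedly takes the head token and filters all its duplicates out of the remaining list (no membership structure at all).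
import Mathlib
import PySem

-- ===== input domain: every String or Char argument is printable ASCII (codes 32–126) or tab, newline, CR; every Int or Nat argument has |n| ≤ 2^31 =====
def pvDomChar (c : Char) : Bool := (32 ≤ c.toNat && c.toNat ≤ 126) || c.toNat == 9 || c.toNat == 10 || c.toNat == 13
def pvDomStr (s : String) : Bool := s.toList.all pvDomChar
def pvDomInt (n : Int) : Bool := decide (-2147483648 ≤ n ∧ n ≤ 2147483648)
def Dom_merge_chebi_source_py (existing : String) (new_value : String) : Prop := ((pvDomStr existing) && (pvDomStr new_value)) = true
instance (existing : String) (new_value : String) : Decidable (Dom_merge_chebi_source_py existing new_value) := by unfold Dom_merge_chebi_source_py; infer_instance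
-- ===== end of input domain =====

-- B replaces A's interleaved seen-set pass by a collect phase plus a purging-worklist dedup (alternative decomposition; same result).

-- ===== PORT A =====
-- _clean: the argument is always a str here, so str(value).strip() = value.strip()
def pvClean (value : String) : String := PySem.Str.strip value

-- s.split(sep) for a nonempty sep (PySem.Chars.splitOn is exactly Python's str.split with a separator)
def pvSplit (s : String) (sep : String) : List String :=
  (PySem.Chars.splitOn s.toList sep.toList).map String.ofList

-- the body of A's inner loop (one token)
def pvStepA (st : List String × PySem.Set String) (token : String) : List String × PySem.Set String :=
  let token := PySem.Str.strip token
  if token ≠ "" ∧ ¬ (PySem.Set.contains st.2 token = true)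
  then (st.1 ++ [token], PySem.Set.add st.2 token)
  else st

def merge_chebi_source_py (existing : String) (new_value : String) : String :=
  let st :=
    [existing, new_value].foldl
      (fun st text => (pvSplit (pvClean text) "|").foldl pvStepA st)
      (([] : List String), (PySem.Set.empty : PySem.Set String))
  PySem.Str.join "|" st.1

-- ===== PORT B =====
-- B's while loop: take the head token, purge its duplicates from the rest; the list shrinks each step.
def pvPurge (tokens : List String) : List String :=
  match tokens with
  | [] => []
  | head :: rest => head :: pvPurge (rest.filter (fun t => t ≠ head))
termination_by tokens.length
decreasing_by
  simp
  exact (List.length_filter_le _ _).trans (List.length_attach (l := rest)).le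

def merge_chebi_source_py_alt (existing : String) (new_value : String) : String :=
  let tokens :=
    [existing, new_value].foldl
      (fun acc text =>
        acc ++ ((pvSplit (pvClean text) "|").map PySem.Str.strip).filter (fun tok => tok ≠ ""))
      ([] : List String)
  PySem.Str.join "|" (pvPurge tokens)

-- ===== PRECONDITION & SPEC =====
def Spec_merge_chebi_source_py (existing : String) (new_value : String) (out : String) : Prop := out = merge_chebi_source_py_alt existing new_value
instance (existing : String) (new_value : String) (out : String) : Decidable (Spec_merge_chebi_source_py existing new_value out) := by unfold Spec_merge_chebi_source_py; infer_instance

-- ===== CLAIM =====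
def Claim_equal_merge_chebi_source_py : Prop := ∀ (existing : String) (new_value : String), Dom_merge_chebi_source_py existing new_value → Spec_merge_chebi_source_py existing new_value (merge_chebi_source_py existing new_value)

-- ===== LEMMAS AND PROOFS =====

-- effect of one A-step on a diagonal state
def pvAdd1 (s : PySem.Set String) (t : String) : PySem.Set String :=
  if PySem.Str.strip t = "" then s else PySem.Set.add s (PySem.Str.strip t)

theorem pvStepA_diag (s : PySem.Set String) (t : String) :
    pvStepA (s, s) t = (pvAdd1 s t, pvAdd1 s t) := by
  unfold pvStepA pvAdd1
  by_cases he : PySem.Str.strip t = ""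
  · simp [he]
  · by_cases hm : PySem.Str.strip t ∈ s
    · simp [he, hm, PySem.Set.add]
    · simp [he, hm, PySem.Set.add]

-- A's inner loop, started on a diagonal state, equals folding Set.add over the
-- stripped non-empty tokens (in both components).
theorem pv_inner (ts : List String) (s : PySem.Set String) :
    ts.foldl pvStepA (s, s)
    = (((ts.map PySem.Str.strip).filter (fun tok => tok ≠ "")).foldl PySem.Set.add s,
       ((ts.map PySem.Str.strip).filter (fun tok => tok ≠ "")).foldl PySem.Set.add s) := by
  induction ts generalizing s with
  | nil => rfl
  | cons t ts ih =>
    rw [List.foldl_cons, pvStepA_diag, ih]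
    simp only [List.map_cons, List.filter_cons]
    unfold pvAdd1
    by_cases he : PySem.Str.strip t = ""
    · simp [he]
    · simp [he]

-- folding Set.add ignores elements already in the accumulator
theorem pv_foldl_add_filter (t : List String) (s : List String) (h : String)
    (hmem : h ∈ s) :
    List.foldl PySem.Set.add s t = List.foldl PySem.Set.add s (t.filter (fun x => x ≠ h)) := by
  induction t generalizing s with
  | nil => rfl
  | cons a t ih =>
    by_cases ha : a = h
    · subst ha
      have : PySem.Set.add s a = s := by simp [PySem.Set.add, hmem]
      simp [this, ih s hmem]
    · have hmem' : h ∈ PySem.Set.add s a := by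
        unfold PySem.Set.add; split <;> simp [hmem]
      simp [ha, ih (PySem.Set.add s a) hmem']

-- a head absent from the rest of the input commutes out of the fold
theorem pv_foldl_add_cons (t : List String) (s : List String) (h : String)
    (hnot : h ∉ t) :
    List.foldl PySem.Set.add (h :: s) t = h :: List.foldl PySem.Set.add s t := by
  induction t generalizing s with
  | nil => rfl
  | cons a t ih =>
    have hah : a ≠ h := fun e => hnot (e ▸ List.mem_cons_self)
    have hnot' : h ∉ t := fun m => hnot (List.mem_cons_of_mem _ m)
    have : PySem.Set.add (h :: s) a = h :: PySem.Set.add s a := by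
      unfold PySem.Set.add
      by_cases hm : a ∈ s
      · simp [hm, hah]
      · simp [hm, hah]
    simp [this, ih _ hnot']

-- the purging worklist computes exactly set(tokens) in first-occurrence order
theorem pvPurge_eq_ofList (l : List String) : pvPurge l = PySem.Set.ofList l := by
  induction hl : l.length using Nat.strong_induction_on generalizing l with
  | _ n ih =>
    match l with
    | [] => simp only [pvPurge]; rfl
    | h :: t =>
      have hfl : (t.filter (fun x => x ≠ h)).length < n := by
        subst hl
        exact Nat.lt_succ_of_le (List.length_filter_le _ _)
      have hrec := ih _ hfl (t.filter (fun x => x ≠ h)) rfl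
      have hstep : PySem.Set.ofList (h :: t)
          = h :: PySem.Set.ofList (t.filter (fun x => x ≠ h)) := by
        rw [PySem.Set.ofList_eq_foldl, PySem.Set.ofList_eq_foldl]
        rw [List.foldl_cons]
        have hadd : PySem.Set.add ([] : List String) h = [h] := rfl
        rw [hadd]
        rw [pv_foldl_add_filter t [h] h (by simp)]
        exact pv_foldl_add_cons _ [] h (by simp)
      rw [pvPurge.eq_def]
      simp only []
      rw [hrec, hstep]

-- ===== VERDICT =====
theorem merge_chebi_source_py_spec : Claim_equal_merge_chebi_source_py := by
  intro existing new_value _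
  show merge_chebi_source_py existing new_value = merge_chebi_source_py_alt existing new_value
  unfold merge_chebi_source_py merge_chebi_source_py_alt
  simp only [List.foldl_cons, List.foldl_nil, List.nil_append]
  rw [show (PySem.Set.empty : PySem.Set String) = ([] : List String) from rfl]
  rw [pv_inner, pv_inner]
  rw [pvPurge_eq_ofList, PySem.Set.ofList_eq_foldl, List.foldl_append]
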